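-- pv_equiv track=rewrite | github.com/ulianamytlovych/lab7 | main1.py | swap_columns
-- ===== SOURCE A (Python) =====
-- def swap_columns(matrix):
--     min_abs_value = float('inf')
--     min_col_index = -1
--
--     for j in range(len(matrix[0])):
--         for i in range(len(matrix)):
--             if abs(matrix[i][j]) < min_abs_value:
--                 min_abs_value = abs(matrix[i][j])
--                 min_col_index = j
--
--     for i in range(len(matrix)):
--         matrix[i][0], matrix[i][min_col_index] = matrix[i][min_col_index], matrix[i][0]
--
--     return matrix
-- ===== SOURCE B (Python) =====
-- def swap_columns(matrix):
--     # Phase 1: per-column minimum of absolute values, via transposition.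
--     cols = list(zip(*matrix))
--     mins = [min(abs(x) for x in col) for col in cols]
--     # Phase 2: leftmost column with the smallest column-minimum (min keeps first).
--     k = min(range(len(mins)), key=mins.__getitem__)
--     # Phase 3: swap column 0 with column k in place.
--     for row in matrix:
--         row[0], row[k] = row[k], row[0]
--     return matrix
-- ===== Notes on version B (the rewrite author's own statement) =====
-- stated objective: alternative
-- what changed: Replaces the single nested index-loop that tracks a running (min_abs_value, min_col_index) pair with three separate phases: transpose via zip(*matrix), build a per-column minimum table with min(), then pick the leftmost argmin of that table with min(range, key=...), and swap by iterating rows directly.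
import Mathlib
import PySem

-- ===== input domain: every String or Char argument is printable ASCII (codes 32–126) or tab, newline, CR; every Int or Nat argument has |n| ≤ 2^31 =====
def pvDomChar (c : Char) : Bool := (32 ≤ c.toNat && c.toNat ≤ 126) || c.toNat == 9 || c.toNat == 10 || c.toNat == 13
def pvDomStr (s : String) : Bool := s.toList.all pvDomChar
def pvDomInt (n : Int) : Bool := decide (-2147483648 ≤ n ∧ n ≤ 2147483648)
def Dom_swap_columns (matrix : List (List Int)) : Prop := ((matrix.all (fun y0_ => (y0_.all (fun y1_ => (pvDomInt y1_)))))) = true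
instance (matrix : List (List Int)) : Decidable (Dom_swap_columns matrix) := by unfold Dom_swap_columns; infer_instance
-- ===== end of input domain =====

-- B restructures A (three phases: transpose + column-min table + argmin) with the same cost;
-- both Pythons mutate `matrix` in place identically, the equivalence proved here is about the return value.

-- ===== PORT A =====
-- Literal port of A's two nested index loops tracking (min_abs_value, min_col_index),
-- with `none` playing float('inf'); getD is exact on indices in range (Pre_ guarantees that,
-- Python raises IndexError outside Pre_), and st.2.toNat is exact since Pre_ rules out the -1 case.
def swap_columns (matrix : List (List Int)) : List (List Int) :=
  let st :=
    (List.range (matrix.headD []).length).foldl (fun (st : Option Int × Int) j =>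
      (List.range matrix.length).foldl (fun (st : Option Int × Int) i =>
        let a := |((matrix.getD i []).getD j 0)|
        match st.1 with
        | none => (some a, (j : Int))
        | some m => if a < m then (some a, (j : Int)) else st) st)
      ((none : Option Int), (-1 : Int))
  let mc := st.2.toNat
  (List.range matrix.length).foldl (fun acc i =>
    let row := acc.getD i []
    acc.set i ((row.set 0 (row.getD mc 0)).set mc (row.getD 0 0))) matrix

-- ===== PORT B =====
-- zip(*matrix): truncates every row to the shortest row length.
def pvColsOf (matrix : List (List Int)) : List (List Int) :=
  match matrix with
  | [] => []
  | r :: rs =>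
    let n := rs.foldl (fun m row => min m row.length) r.length
    (List.range n).map (fun j => (r :: rs).map (fun row => row.getD j 0))

-- min(abs(x) for x in col); the [] case is Python's ValueError, excluded by Pre_.
def pvColMin : List Int → Int
  | [] => 0
  | a :: t => t.foldl (fun m x => min m |x|) |a|

def swap_columns_alt (matrix : List (List Int)) : List (List Int) :=
  let mins := (pvColsOf matrix).map pvColMin
  let k := match List.range mins.length with
           | [] => 0
           | i0 :: rest => rest.foldl (fun best i =>
               if mins.getD i 0 < mins.getD best 0 then i else best) i0
  matrix.map (fun row =>
    let a := row.getD 0 0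
    let b := row.getD k 0
    (row.set 0 b).set k a)

-- ===== PRECONDITION & SPEC =====
-- Exactly the inputs on which the Python A returns: the matrix is nonempty, its first row is
-- nonempty, and no row is shorter than the first (otherwise some matrix[i][j] access raises
-- IndexError; A never returns with min_col_index = -1).
def Pre_swap_columns (matrix : List (List Int)) : Prop :=
  matrix ≠ [] ∧ 1 ≤ (matrix.headD []).length ∧
    ∀ row ∈ matrix, (matrix.headD []).length ≤ row.length
instance (matrix : List (List Int)) : Decidable (Pre_swap_columns matrix) := by
  unfold Pre_swap_columns; infer_instance
def pvWitness_swap_columns : List (List Int) := [[3, -1, 4], [2, 5, -2]]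

def Spec_swap_columns (matrix : List (List Int)) (out : List (List Int)) : Prop := out = swap_columns_alt matrix
instance (matrix : List (List Int)) (out : List (List Int)) : Decidable (Spec_swap_columns matrix out) := by unfold Spec_swap_columns; infer_instance

-- ===== CLAIM (what is proved, stated in full; the proofs are below) =====
def Claim_equal_swap_columns : Prop := ∀ (matrix : List (List Int)), Dom_swap_columns matrix → Pre_swap_columns matrix → Spec_swap_columns matrix (swap_columns matrix)

-- ===== LEMMAS AND PROOFS =====

-- an index fold reading l.getD is a fold over l
theorem pv_range_map_getD {α : Type} (l : List α) (d : α) :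
    (List.range l.length).map (fun i => l.getD i d) = l := by
  induction l with
  | nil => simp
  | cons a t ih =>
    simp only [List.length_cons, List.range_succ_eq_map, List.map_cons, List.map_map]
    simpa using ih

theorem pv_foldl_min_le (t : List Int) (m : Int) :
    t.foldl (fun m x => min m |x|) m ≤ m := by
  induction t generalizing m with
  | nil => simp
  | cons x t ih => exact le_trans (ih _) (min_le_left _ _)

-- A's inner row scan over a column, started at (some m, c), reduces to a single
-- min / strict-improvement step.
theorem pv_inner_some (j : Nat) (col : List Int) (m : Int) (c : Int) :
    col.foldl (fun (st : Option Int × Int) x =>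
        let a := |x|
        match st.1 with
        | none => (some a, (j : Int))
        | some m => if a < m then (some a, (j : Int)) else st) (some m, c)
      = (some (col.foldl (fun m x => min m |x|) m),
          if col.foldl (fun m x => min m |x|) m < m then (j : Int) else c) := by
  induction col generalizing m c with
  | nil => simp
  | cons x t ih =>
    by_cases h : |x| < m
    · have hmin : min m |x| = |x| := min_eq_right (le_of_lt h)
      have hle : t.foldl (fun m x => min m |x|) |x| ≤ |x| := pv_foldl_min_le t _
      have hF : t.foldl (fun m x => min m |x|) |x| < m := lt_of_le_of_lt hle h
      simp only [List.foldl_cons, hmin, if_pos h, ih, ite_self, if_pos hF]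
    · have hmin : min m |x| = m := min_eq_left (le_of_not_gt h)
      simp only [List.foldl_cons, hmin, if_neg h, ih]

theorem pv_inner_none (j : Nat) (x : Int) (t : List Int) (c : Int) :
    (x :: t).foldl (fun (st : Option Int × Int) y =>
        let a := |y|
        match st.1 with
        | none => (some a, (j : Int))
        | some m => if a < m then (some a, (j : Int)) else st) (none, c)
      = (some (pvColMin (x :: t)), (j : Int)) := by
  simp only [List.foldl_cons, pvColMin, pv_inner_some]
  simp

-- the reduced outer fold equals B's argmin fold, given the correspondence invariant
theorem pv_outer_argmin (mins : List Int) (js : List Nat) (c : Nat)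
    (cmin : Nat → Int)
    (hc : mins.getD c 0 = cmin c) (hjs : ∀ j ∈ js, mins.getD j 0 = cmin j) :
    js.foldl (fun (st : Option Int × Int) j =>
        if cmin j < (st.1.getD 0) then (some (cmin j), (j : Int)) else st)
        (some (cmin c), (c : Int))
      = (some (cmin (js.foldl (fun best i =>
            if mins.getD i 0 < mins.getD best 0 then i else best) c)),
         ((js.foldl (fun best i =>
            if mins.getD i 0 < mins.getD best 0 then i else best) c : Nat) : Int)) := by
  induction js generalizing c with
  | nil => simp
  | cons j t ih =>
    simp only [List.foldl_cons, Option.getD_some]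
    rw [hjs j (List.mem_cons_self), hc]
    by_cases h : cmin j < cmin c
    · simp only [if_pos h]
      exact ih j (hjs j List.mem_cons_self) (fun i hi => hjs i (List.mem_cons_of_mem _ hi))
    · simp only [if_neg h]
      exact ih c hc (fun i hi => hjs i (List.mem_cons_of_mem _ hi))

-- the in-place index-swap loop is a map over the rows
theorem pv_swap_loop_eq_map (F : List Int → List Int) :
    ∀ (l : List (List Int)),
    (List.range l.length).foldl (fun acc i =>
        let row := acc.getD i []
        acc.set i (F row)) l = l.map F := by
  have key : ∀ (n : Nat) (l : List (List Int)), n ≤ l.length →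
      (List.range n).foldl (fun acc i =>
          let row := acc.getD i []
          acc.set i (F row)) l = (l.take n).map F ++ l.drop n := by
    intro n
    induction n with
    | zero => intro l _; simp
    | succ n ih =>
      intro l hn
      have hn' : n < l.length := hn
      rw [List.range_succ, List.foldl_append, ih l (le_of_lt hn')]
      simp only [List.foldl_cons, List.foldl_nil]
      have hlen : ((l.take n).map F).length = n := by
        simp [Nat.min_eq_left (le_of_lt hn')]
      rw [List.getD_append_right _ _ _ _ (le_of_eq hlen),
          List.set_append_right _ _ (le_of_eq hlen), hlen, Nat.sub_self,
          List.drop_eq_getElem_cons hn']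
      rw [List.getD_cons_zero, List.set_cons_zero, List.take_add_one,
        List.getElem?_eq_getElem hn']
      simp only [Option.toList_some, List.map_append, List.map_cons, List.map_nil,
        List.append_assoc, List.singleton_append, List.map_take]
  intro l; rw [key l.length l (le_refl _)]; simp

-- under Pre_, the zip(*matrix) truncation length is the first row's length
theorem pv_foldl_min_start (t : List Int) : ∀ (m a : Int),
    t.foldl (fun m x => min m |x|) (min m a) = min m (t.foldl (fun m x => min m |x|) a) := by
  induction t with
  | nil => intro m a; rfl
  | cons x t ih => intro m a; simp only [List.foldl_cons, min_assoc]; exact ih m (min a |x|)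

theorem pv_minlen (r : List Int) (rs : List (List Int))
    (h : ∀ row ∈ rs, r.length ≤ row.length) :
    rs.foldl (fun m row => min m row.length) r.length = r.length := by
  induction rs with
  | nil => rfl
  | cons q t ih =>
    simp only [List.foldl_cons]
    rw [min_eq_left (h q List.mem_cons_self)]
    exact ih (fun row hr => h row (List.mem_cons_of_mem _ hr))

-- ===== VERDICT (by name: the statement is the Claim_ definition above) =====
theorem swap_columns_spec : Claim_equal_swap_columns := by
  intro matrix _ hpre
  obtain ⟨hne, h1, hrows⟩ := hpre
  obtain ⟨r, rs, rfl⟩ : ∃ r rs, matrix = r :: rs := by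
    cases matrix with
    | nil => exact absurd rfl hne
    | cons r rs => exact ⟨r, rs, rfl⟩
  show swap_columns (r :: rs) = swap_columns_alt (r :: rs)
  -- abbreviations
  set M := r :: rs with hM
  have hhead : (M.headD []).length = r.length := rfl
  have hmin : rs.foldl (fun m row => min m row.length) r.length = r.length :=
    pv_minlen r rs (fun row hr => hrows row (List.mem_cons_of_mem _ hr))
  -- column j as a list, and its min
  set colj : Nat → List Int := fun j => M.map (fun row => row.getD j 0) with hcolj
  set cmin : Nat → Int := fun j => pvColMin (colj j) with hcmin
  -- B's pieces
  have hcols : pvColsOf M = (List.range r.length).map colj := by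
    simp only [pvColsOf, hM, hmin, hcolj]
  have hmins : (pvColsOf M).map pvColMin = (List.range r.length).map cmin := by
    rw [hcols, List.map_map]; rfl
  have hminslen : ((pvColsOf M).map pvColMin).length = r.length := by
    rw [hmins]; simp
  have hminsget : ∀ j, j < r.length →
      ((pvColsOf M).map pvColMin).getD j 0 = cmin j := by
    intro j hj
    rw [hmins, List.getD_eq_getElem?_getD, List.getElem?_map, List.getElem?_range hj]
    rfl
  -- A's inner fold over row indices is a fold over the column list
  have hinner : ∀ (j : Nat) (st : Option Int × Int),
      (List.range M.length).foldl (fun (st : Option Int × Int) i =>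
        let a := |((M.getD i []).getD j 0)|
        match st.1 with
        | none => (some a, (j : Int))
        | some m => if a < m then (some a, (j : Int)) else st) st
      = (colj j).foldl (fun (st : Option Int × Int) x =>
          let a := |x|
          match st.1 with
          | none => (some a, (j : Int))
          | some m => if a < m then (some a, (j : Int)) else st) st := by
    intro j st
    simp only [hcolj]
    rw [show M.map (fun row => row.getD j 0)
        = (List.range M.length).map (fun i => (M.getD i []).getD j 0) by
      conv_lhs => rw [← pv_range_map_getD M []]
      rw [List.map_map]
      rfl]
    rw [List.foldl_map]
  -- A's inner fold on (some m, c) is the reduced step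
  have hstep : ∀ (j : Nat) (m : Int) (c : Int),
      (List.range M.length).foldl (fun (st : Option Int × Int) i =>
        let a := |((M.getD i []).getD j 0)|
        match st.1 with
        | none => (some a, (j : Int))
        | some m => if a < m then (some a, (j : Int)) else st) (some m, c)
      = if cmin j < m then (some (cmin j), (j : Int)) else (some m, c) := by
    intro j m c
    rw [hinner j _, pv_inner_some j (colj j) m c]
    have hcol : colj j = (r.getD j 0) :: rs.map (fun row => row.getD j 0) := by
      simp [hcolj, hM]
    have : cmin j = (rs.map (fun row => row.getD j 0)).foldl
        (fun m x => min m |x|) |r.getD j 0| := by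
      rw [hcmin]; simp only [hcol, pvColMin]
    have heq : (colj j).foldl (fun m x => min m |x|) m = min m (cmin j) := by
      rw [hcol, this]
      simp only [List.foldl_cons]
      exact pv_foldl_min_start _ m _
    rw [heq]
    by_cases h : cmin j < m
    · rw [min_eq_right (le_of_lt h)]; simp [h]
    · rw [min_eq_left (le_of_not_gt h)]; simp [h]
  -- first column: inner fold on (none, -1)
  have hfirst :
      (List.range M.length).foldl (fun (st : Option Int × Int) i =>
        let a := |((M.getD i []).getD 0 0)|
        match st.1 with
        | none => (some a, ((0 : Nat) : Int))
        | some m => if a < m then (some a, ((0 : Nat) : Int)) else st)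
        (none, (-1 : Int))
      = (some (cmin 0), ((0 : Nat) : Int)) := by
    rw [hinner 0 _]
    have hcol : colj 0 = (r.getD 0 0) :: rs.map (fun row => row.getD 0 0) := by
      simp [hcolj, hM]
    rw [hcol, pv_inner_none 0 _ _ _]
    simp [hcmin, hcol]
  -- reduce A's outer fold to the argmin fold
  obtain ⟨n, hn⟩ : ∃ n, r.length = n + 1 :=
    ⟨r.length - 1, by omega⟩
  have hrange : List.range r.length = 0 :: (List.range n).map (· + 1) := by
    rw [hn, List.range_succ_eq_map]
  -- the state after A's outer fold
  set k : Nat := ((List.range n).map (· + 1)).foldl (fun best i =>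
      if ((pvColsOf M).map pvColMin).getD i 0
        < ((pvColsOf M).map pvColMin).getD best 0 then i else best) 0 with hk
  have houter :
      (List.range (M.headD []).length).foldl (fun (st : Option Int × Int) j =>
        (List.range M.length).foldl (fun (st : Option Int × Int) i =>
          let a := |((M.getD i []).getD j 0)|
          match st.1 with
          | none => (some a, (j : Int))
          | some m => if a < m then (some a, (j : Int)) else st) st)
        ((none : Option Int), (-1 : Int))
      = (some (cmin k), (k : Int)) := by
    rw [hhead, hrange]
    simp only [List.foldl_cons]
    rw [hfirst]
    have hredux : ∀ (js : List Nat) (st : Option Int × Int),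
        js.foldl (fun (st : Option Int × Int) j =>
          (List.range M.length).foldl (fun (st : Option Int × Int) i =>
            let a := |((M.getD i []).getD j 0)|
            match st.1 with
            | none => (some a, (j : Int))
            | some m => if a < m then (some a, (j : Int)) else st) st) st
        = js.foldl (fun (st : Option Int × Int) j =>
            if cmin j < (st.1.getD 0) then (some (cmin j), (j : Int)) else st) st
        ∨ st.1 = none := by
      intro js st
      induction js generalizing st with
      | nil => left; rfl
      | cons j t ih =>
        cases st with
        | mk o c =>
          cases o with
          | none => right; rfl
          | some m =>
            left
            simp only [List.foldl_cons]
            rw [hstep j m c]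
            rcases ih (if cmin j < m then (some (cmin j), (j : Int)) else (some m, c)) with h | h
            · rw [h]
              rfl
            · exact absurd h (by split_ifs <;> simp)
    rcases hredux ((List.range n).map (· + 1)) (some (cmin 0), ((0 : Nat) : Int))
      with h | h
    · rw [h]
      have := pv_outer_argmin ((pvColsOf M).map pvColMin)
        ((List.range n).map (· + 1)) 0 cmin
        (hminsget 0 (by omega))
        (fun j hj => by
          obtain ⟨i, hi, rfl⟩ := List.mem_map.mp hj
          exact hminsget (i + 1) (by
            have := List.mem_range.mp hi; omega))
      rw [this, ← hk]
    · simp at h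
  -- B's k equals A's k
  have hkB : (match List.range ((pvColsOf M).map pvColMin).length with
           | [] => 0
           | i0 :: rest => rest.foldl (fun best i =>
               if ((pvColsOf M).map pvColMin).getD i 0
                 < ((pvColsOf M).map pvColMin).getD best 0 then i else best) i0) = k := by
    rw [hminslen, hrange]
  -- now unfold both sides
  simp only [swap_columns]
  rw [houter]
  simp only [Int.toNat_natCast]
  rw [pv_swap_loop_eq_map (fun row => (row.set 0 (row.getD k 0)).set k (row.getD 0 0)) M]
  show M.map _ = swap_columns_alt M
  simp only [swap_columns_alt]
  rw [hkB]
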